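-- pv_equiv track=rewrite | github.com/SomilKSharma/AdvancedDSA | Dynamic Programming/maxums.py | solve
-- ===== SOURCE A (Python) =====
-- def solve(A, B, C, D):
--
--     #create a dynamic array
--     dynamic=[
--         [0]*len(A)
--         for _ in range(3)
--     ]
--
--     #iterate for the first row(A[i]*B)
--     dynamic[0][0]=A[0]*B
--     for index in range(1,len(A)):
--         #get the maximum upto an index
--         dynamic[0][index]=max(
--             dynamic[0][index-1],
--             A[index]*B
--         )
--
--     #iterate for the second row(A[j]*C)
--     dynamic[1][0]=dynamic[0][0]+A[0]*C
--     for index in range(1,len(A)):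
--         #get the maximum upto the index
--         dynamic[1][index]=max(
--             dynamic[1][index-1],
--             dynamic[0][index]+A[index]*C
--         )
--
--     #iterate for the third row(A[k]*D)
--     dynamic[2][0]=dynamic[1][0]+A[0]*D
--     for index in range(1,len(A)):
--         #get the maximum upto the index
--         dynamic[2][index]=max(
--             dynamic[2][index-1],
--             dynamic[1][index]+A[index]*D
--         )
--
--     #return the maximum possible value
--     return dynamic[2][len(A)-1]
-- ===== SOURCE B (Python) =====
-- def solve(A, B, C, D):
--     # answer = max over middle index j of
--     #   (max prefix value of A[i]*B, i <= j) + A[j]*C + (max suffix value of A[k]*D, k >= j)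
--     suf = []
--     m = A[-1] * D
--     for x in reversed(A):
--         m = max(m, x * D)
--         suf.append(m)
--     suf.reverse()
--     pref = A[0] * B
--     best = pref + A[0] * C + suf[0]
--     for x, s in zip(A[1:], suf[1:]):
--         pref = max(pref, x * B)
--         best = max(best, pref + x * C + s)
--     return best
-- ===== Notes on version B (the rewrite author's own statement) =====
-- stated objective: alternative
-- what changed: Instead of A's three staged prefix-max DP rows over a 3xn table, B decomposes the answer around the middle index j: one backward pass builds a suffix-max array of A[k]*D, then one forward pass keeps a running prefix max of A[i]*B and combines pref + A[j]*C + suf[j] at each j.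
import Mathlib
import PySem

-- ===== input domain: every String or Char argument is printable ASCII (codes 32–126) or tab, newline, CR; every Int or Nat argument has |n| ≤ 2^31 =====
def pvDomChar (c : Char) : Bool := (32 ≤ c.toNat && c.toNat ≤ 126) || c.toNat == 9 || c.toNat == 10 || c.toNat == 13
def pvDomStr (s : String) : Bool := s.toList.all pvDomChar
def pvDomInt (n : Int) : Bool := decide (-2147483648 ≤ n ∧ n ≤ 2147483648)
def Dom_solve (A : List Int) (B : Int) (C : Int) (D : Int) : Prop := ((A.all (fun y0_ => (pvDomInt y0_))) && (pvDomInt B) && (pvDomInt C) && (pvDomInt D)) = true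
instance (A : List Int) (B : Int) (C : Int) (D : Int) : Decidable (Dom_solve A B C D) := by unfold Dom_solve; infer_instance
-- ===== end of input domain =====

-- B replaces A's three staged prefix-max DP rows by a suffix-max array of A[k]*D plus one forward
-- pass combining prefix max of A[i]*B with A[j]*C at each middle index j (alternative decomposition).


-- ===== PORT A =====
-- Python's rows are slots of one pre-zeroed 2D list written left to right; each row is represented
-- as the list grown by the loop (same values at the same indices). pyGetD's default 0 is the
-- pre-filled zero and is never read at an in-range index; all loop indices are nonnegative.
def solve (A : List Int) (B : Int) (C : Int) (D : Int) : Int :=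
  let n : Int := A.length
  let row0 := (PySem.List.pyRange 1 n 1).foldl
    (fun r index => r ++ [max (PySem.List.pyGetD r (index - 1) 0)
                              (PySem.List.pyGetD A index 0 * B)])
    [PySem.List.pyGetD A 0 0 * B]
  let row1 := (PySem.List.pyRange 1 n 1).foldl
    (fun r index => r ++ [max (PySem.List.pyGetD r (index - 1) 0)
                              (PySem.List.pyGetD row0 index 0 + PySem.List.pyGetD A index 0 * C)])
    [PySem.List.pyGetD row0 0 0 + PySem.List.pyGetD A 0 0 * C]
  let row2 := (PySem.List.pyRange 1 n 1).foldl
    (fun r index => r ++ [max (PySem.List.pyGetD r (index - 1) 0)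
                              (PySem.List.pyGetD row1 index 0 + PySem.List.pyGetD A index 0 * D)])
    [PySem.List.pyGetD row1 0 0 + PySem.List.pyGetD A 0 0 * D]
  PySem.List.pyGetD row2 (n - 1) 0

-- ===== PORT B =====
-- body of Source B's backward loop: append the running suffix max of x*D
def sufStep (D : Int) (st : List Int × Int) (x : Int) : List Int × Int :=
  let m := max st.2 (x * D)
  (st.1 ++ [m], m)

-- body of Source B's forward loop over zip(A[1:], suf[1:]): running prefix max and running answer
def combStep (B : Int) (C : Int) (st : Int × Int) (xs : Int × Int) : Int × Int :=
  let pref := max st.1 (xs.1 * B)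
  (pref, max st.2 (pref + xs.1 * C + xs.2))

def solve_alt (A : List Int) (B : Int) (C : Int) (D : Int) : Int :=
  let m0 := PySem.List.pyGetD A (-1) 0 * D          -- m = A[-1]*D (IndexError on [] is outside Pre_)
  let scanned := A.reverse.foldl (sufStep D) ([], m0)
  let suf := scanned.1.reverse                       -- suf.reverse()
  let pref := PySem.List.pyGetD A 0 0 * B
  let best := pref + PySem.List.pyGetD A 0 0 * C + PySem.List.pyGetD suf 0 0
  let p := ((PySem.List.slice A (some 1) none).zip (PySem.List.slice suf (some 1) none)).foldl
    (combStep B C) (pref, best)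
  p.2

-- ===== PRECONDITION & SPEC =====
-- Python A indexes A[0] and raises IndexError on an empty list (Source B raises at A[-1] there too).
def Pre_solve (A : List Int) (B : Int) (C : Int) (D : Int) : Prop := A ≠ []
instance (A : List Int) (B : Int) (C : Int) (D : Int) : Decidable (Pre_solve A B C D) := by unfold Pre_solve; infer_instance
def pvWitness_solve : List Int × Int × Int × Int := ([1, -2, 3], 2, -3, 4)

def Spec_solve (A : List Int) (B : Int) (C : Int) (D : Int) (out : Int) : Prop := out = solve_alt A B C D
instance (A : List Int) (B : Int) (C : Int) (D : Int) (out : Int) : Decidable (Spec_solve A B C D out) := by unfold Spec_solve; infer_instance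

-- ===== CLAIM (what is proved, stated in full; the proofs are below) =====
def Claim_equal_solve : Prop := ∀ (A : List Int) (B : Int) (C : Int) (D : Int), Dom_solve A B C D → Pre_solve A B C D → Spec_solve A B C D (solve A B C D)

-- ===== LEMMAS AND PROOFS =====

-- mathematical suffix maximum of x*D over a nonempty list (0 on [])
def maxSufD (D : Int) : List Int → Int
  | [] => 0
  | x :: t => if t.isEmpty then x * D else max (x * D) (maxSufD D t)

-- the list of suffix maxima: element j is maxSufD of the suffix starting at j
def sufListD (D : Int) : List Int → List Int
  | [] => []
  | x :: t => maxSufD D (x :: t) :: sufListD D t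

lemma maxSufD_cons (D a : Int) (as : List Int) (h : as ≠ []) :
    maxSufD D (a :: as) = max (a * D) (maxSufD D as) := by
  simp [maxSufD, List.isEmpty_eq_false_iff.mpr h]

-- scalar-fold characterisation of A's three DP rows (one step of the fused recurrence)
def solveStep (B : Int) (C : Int) (D : Int) (s : Int × Int × Int) (x : Int) : Int × Int × Int :=
  let b1 := max s.1 (x * B)
  let b2 := max s.2.1 (b1 + x * C)
  let b3 := max s.2.2 (b2 + x * D)
  (b1, b2, b3)

-- the value at index i of a row whose loop reads the previous cell and takes max with w index
def ffun (w : Int → Int) (c : Int) : Nat → Int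
  | 0 => c
  | i + 1 => max (ffun w c i) (w ((i : Int) + 1))

-- characterisation of one of A's row loops: length and every cell
lemma rowChar (w : Int → Int) (c : Int) (m : Nat) (hm : 1 ≤ m) :
    ((PySem.List.pyRange 1 (m : Int) 1).foldl
      (fun r index => r ++ [max (PySem.List.pyGetD r (index - 1) 0) (w index)]) [c]).length = m ∧
    ∀ i : Nat, i < m →
      ((PySem.List.pyRange 1 (m : Int) 1).foldl
        (fun r index => r ++ [max (PySem.List.pyGetD r (index - 1) 0) (w index)]) [c]).getD i 0
        = ffun w c i := by
  induction m with
  | zero => omega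
  | succ m ih =>
    rcases Nat.eq_or_lt_of_le hm with h1 | h1
    · have hm0 : m = 0 := by omega
      subst hm0
      rw [PySem.List.pyRange_one_eq_nil (by norm_num)]
      constructor
      · simp
      · intro i hi
        interval_cases i
        simp [ffun]
    · have hm1 : 1 ≤ m := by omega
      obtain ⟨hlen, hget⟩ := ih hm1
      have hsplit : PySem.List.pyRange 1 ((m : Int) + 1) 1
          = PySem.List.pyRange 1 (m : Int) 1 ++ [(m : Int)] :=
        PySem.List.pyRange_one_succ_right (by exact_mod_cast hm1)
      rw [show ((m + 1 : Nat) : Int) = (m : Int) + 1 by push_cast; ring, hsplit, List.foldl_append]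
      set R := (PySem.List.pyRange 1 (m : Int) 1).foldl
        (fun r index => r ++ [max (PySem.List.pyGetD r (index - 1) 0) (w index)]) [c] with hR
      simp only [List.foldl_cons, List.foldl_nil]
      have hprev : PySem.List.pyGetD R ((m : Int) - 1) 0 = ffun w c (m - 1) := by
        rw [show ((m:Int) - 1) = ((m - 1 : Nat) : Int) by omega, PySem.List.pyGetD_natCast]
        exact hget (m-1) (by omega)
      have hlast : max (PySem.List.pyGetD R ((m : Int) - 1) 0) (w (m : Int)) = ffun w c m := by
        rw [hprev]
        have : m = (m - 1) + 1 := by omega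
        rw [this, ffun]
        have e1 : m - 1 + 1 - 1 = m - 1 := by omega
        have e2 : ((m - 1 + 1 : Nat) : Int) = ((m - 1 : Nat) : Int) + 1 := by push_cast; ring
        rw [e1, e2]
      constructor
      · simp [hlen]
      · intro i hi
        rcases Nat.lt_or_ge i m with h | h
        · rw [List.getD_append _ _ _ _ (by omega)]
          exact hget i h
        · have : i = m := by omega
          subst this
          rw [List.getD_append_right _ _ _ _ hlen.le, hlen]
          simpa using hlast

-- A's table computes the fused scalar fold
lemma solve_foldl (a : Int) (as : List Int) (B : Int) (C : Int) (D : Int) :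
    solve (a :: as) B C D
      = (as.foldl (solveStep B C D) (a * B, a * B + a * C, a * B + a * C + a * D)).2.2 := by
  simp only [solve, List.length_cons, PySem.List.pyGetD_zero_cons]
  set L := as.length with hL
  set A := a :: as with hA
  set R0 := (PySem.List.pyRange 1 ((L + 1 : Nat) : Int) 1).foldl
    (fun r index => r ++ [max (PySem.List.pyGetD r (index - 1) 0)
                              (PySem.List.pyGetD A index 0 * B)]) [a * B] with hR0
  set R1 := (PySem.List.pyRange 1 ((L + 1 : Nat) : Int) 1).foldl
    (fun r index => r ++ [max (PySem.List.pyGetD r (index - 1) 0)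
                              (PySem.List.pyGetD R0 index 0 + PySem.List.pyGetD A index 0 * C)])
    [PySem.List.pyGetD R0 0 0 + a * C] with hR1
  set R2 := (PySem.List.pyRange 1 ((L + 1 : Nat) : Int) 1).foldl
    (fun r index => r ++ [max (PySem.List.pyGetD r (index - 1) 0)
                              (PySem.List.pyGetD R1 index 0 + PySem.List.pyGetD A index 0 * D)])
    [PySem.List.pyGetD R1 0 0 + a * D] with hR2
  obtain ⟨h0len, h0get⟩ :=
    rowChar (fun index => PySem.List.pyGetD A index 0 * B) (a * B) (L + 1) (by omega)
  rw [← hR0] at h0get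
  obtain ⟨h1len, h1get⟩ :=
    rowChar (fun index => PySem.List.pyGetD R0 index 0 + PySem.List.pyGetD A index 0 * C)
      (PySem.List.pyGetD R0 0 0 + a * C) (L + 1) (by omega)
  rw [← hR1] at h1get
  obtain ⟨h2len, h2get⟩ :=
    rowChar (fun index => PySem.List.pyGetD R1 index 0 + PySem.List.pyGetD A index 0 * D)
      (PySem.List.pyGetD R1 0 0 + a * D) (L + 1) (by omega)
  rw [← hR2] at h2get
  have hAi : ∀ m : Nat, m < L → PySem.List.pyGetD A ((m : Int) + 1) 0 = as.getD m 0 := by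
    intro m hm
    rw [show ((m : Int) + 1) = ((m + 1 : Nat) : Int) by push_cast; ring,
      PySem.List.pyGetD_natCast, hA, List.getD_cons_succ]
  have hz0 : PySem.List.pyGetD R0 0 0 = a * B := by
    rw [show (0 : Int) = ((0 : Nat) : Int) by norm_num, PySem.List.pyGetD_natCast]
    simpa [ffun] using h0get 0 (by omega)
  have hz1 : PySem.List.pyGetD R1 0 0 = a * B + a * C := by
    rw [show (0 : Int) = ((0 : Nat) : Int) by norm_num, PySem.List.pyGetD_natCast]
    simpa [ffun, hz0] using h1get 0 (by omega)
  have key : ∀ m : Nat, m ≤ L →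
      (as.take m).foldl (solveStep B C D) (a * B, a * B + a * C, a * B + a * C + a * D)
        = (R0.getD m 0, R1.getD m 0, R2.getD m 0) := by
    intro m
    induction m with
    | zero =>
      intro _
      rw [h0get 0 (by omega), h1get 0 (by omega), h2get 0 (by omega)]
      simp [ffun, hz0, hz1]
    | succ m ih =>
      intro hm
      have hmL : m < L := by omega
      have hx : as[m]? = some (as.getD m 0) := by
        rw [List.getD_eq_getElem _ _ (by omega)]
        exact List.getElem?_eq_getElem (by omega)
      rw [List.take_add_one, hx, List.foldl_append, ih (by omega)]
      have e0 : R0.getD (m + 1) 0 = max (R0.getD m 0) (as.getD m 0 * B) := by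
        rw [h0get (m + 1) (by omega), h0get m (by omega)]
        show max (ffun _ _ m) (PySem.List.pyGetD A ((m : Int) + 1) 0 * B) = _
        rw [hAi m hmL]
      have e1 : R1.getD (m + 1) 0 = max (R1.getD m 0) (R0.getD (m + 1) 0 + as.getD m 0 * C) := by
        rw [h1get (m + 1) (by omega), h1get m (by omega)]
        show max (ffun _ _ m)
          (PySem.List.pyGetD R0 ((m : Int) + 1) 0 + PySem.List.pyGetD A ((m : Int) + 1) 0 * C) = _
        rw [hAi m hmL,
          show ((m : Int) + 1) = ((m + 1 : Nat) : Int) by push_cast; ring,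
          PySem.List.pyGetD_natCast]
      have e2 : R2.getD (m + 1) 0 = max (R2.getD m 0) (R1.getD (m + 1) 0 + as.getD m 0 * D) := by
        rw [h2get (m + 1) (by omega), h2get m (by omega)]
        show max (ffun _ _ m)
          (PySem.List.pyGetD R1 ((m : Int) + 1) 0 + PySem.List.pyGetD A ((m : Int) + 1) 0 * D) = _
        rw [hAi m hmL,
          show ((m : Int) + 1) = ((m + 1 : Nat) : Int) by push_cast; ring,
          PySem.List.pyGetD_natCast]
      simp only [Option.toList_some, List.foldl_cons, List.foldl_nil, solveStep, e0, e1, e2]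
  have hfin := key L (le_refl L)
  rw [List.take_of_length_le (by omega)] at hfin
  rw [show (((L + 1 : Nat) : Int) - 1) = ((L : Nat) : Int) by push_cast; ring,
    PySem.List.pyGetD_natCast, hfin]

-- B's backward scan builds exactly the suffix-max list (reversed) and its overall max
lemma scan_suf (D : Int) (l : List Int) (h : l ≠ []) :
    l.reverse.foldl (sufStep D) ([], PySem.List.pyGetD l (-1) 0 * D)
      = ((sufListD D l).reverse, maxSufD D l) := by
  induction l with
  | nil => simp at h
  | cons a t ih =>
    cases t with
    | nil =>
      rw [PySem.List.pyGetD_neg_one (h := by simp)]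
      simp [sufStep, sufListD, maxSufD]
    | cons b t' =>
      have ht : (b :: t') ≠ [] := by simp
      have hlast : PySem.List.pyGetD (a :: b :: t') (-1) 0
          = PySem.List.pyGetD (b :: t') (-1) 0 := by
        rw [PySem.List.pyGetD_neg_one (h := by simp), PySem.List.pyGetD_neg_one (h := ht),
          List.getLast_cons ht]
      rw [List.reverse_cons, List.foldl_append, hlast, ih ht]
      simp only [List.foldl_cons, List.foldl_nil, sufStep, Prod.mk.injEq]
      refine ⟨?_, max_comm _ _⟩
      rw [show sufListD D (a :: b :: t')
            = maxSufD D (a :: b :: t') :: sufListD D (b :: t') from rfl,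
        List.reverse_cons, maxSufD_cons D a (b :: t') ht, max_comm]

-- max/plus shuffles used to relate the two accumulators
lemma maxplus1 (b3 b2 v d : Int) :
    max b3 (max b2 v + d) = max (max b3 (b2 + d)) (v + d) := by
  simp only [max_def]; split_ifs <;> omega

lemma maxplus2 (b3 b2 v d s : Int) :
    max (max b3 (max b2 v + d)) (max b2 v + s)
      = max (max b3 (b2 + max d s)) (v + max d s) := by
  simp only [max_def]; split_ifs <;> omega

-- the heart: A's fused fold equals B's forward combine over the zipped suffix maxima
lemma fold_eq_comb (B C D : Int) (xs : List Int) (hxs : xs ≠ []) :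
    ∀ b1 b2 b3 : Int,
    (xs.foldl (solveStep B C D) (b1, b2, b3)).2.2
      = ((xs.zip (sufListD D xs)).foldl (combStep B C) (b1, max b3 (b2 + maxSufD D xs))).2 := by
  induction xs with
  | nil => simp at hxs
  | cons x t ih =>
    intro b1 b2 b3
    cases t with
    | nil =>
      simp only [sufListD, maxSufD, List.isEmpty_nil, if_true, List.zip_cons_cons,
        List.zip_nil_right, List.foldl_cons, List.foldl_nil, solveStep, combStep]
      exact maxplus1 b3 b2 (max b1 (x * B) + x * C) (x * D)
    | cons y t' =>
      have ht : (y :: t') ≠ [] := by simp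
      rw [show sufListD D (x :: y :: t')
            = maxSufD D (x :: y :: t') :: sufListD D (y :: t') from rfl,
        List.zip_cons_cons]
      rw [show List.foldl (solveStep B C D) (b1, b2, b3) (x :: y :: t')
            = List.foldl (solveStep B C D)
                (max b1 (x * B), max b2 (max b1 (x * B) + x * C),
                 max b3 (max b2 (max b1 (x * B) + x * C) + x * D)) (y :: t') from rfl]
      rw [ih ht]
      rw [show List.foldl (combStep B C) (b1, max b3 (b2 + maxSufD D (x :: y :: t')))
                ((x, maxSufD D (x :: y :: t')) :: (y :: t').zip (sufListD D (y :: t')))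
            = List.foldl (combStep B C)
                (max b1 (x * B),
                 max (max b3 (b2 + maxSufD D (x :: y :: t')))
                     (max b1 (x * B) + x * C + maxSufD D (x :: y :: t')))
                ((y :: t').zip (sufListD D (y :: t'))) from rfl]
      rw [maxSufD_cons D x (y :: t') ht]
      congr 2
      rw [Prod.mk.injEq]
      exact ⟨rfl, maxplus2 b3 b2 (max b1 (x * B) + x * C) (x * D) (maxSufD D (y :: t'))⟩

-- B's port on a nonempty list computes the forward combine over the zipped suffix maxima
lemma solve_alt_char (a : Int) (as : List Int) (B : Int) (C : Int) (D : Int) :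
    solve_alt (a :: as) B C D
      = ((as.zip (sufListD D as)).foldl (combStep B C)
          (a * B, a * B + a * C + maxSufD D (a :: as))).2 := by
  simp only [solve_alt, PySem.List.pyGetD_zero_cons]
  rw [scan_suf D (a :: as) (by simp), List.reverse_reverse]
  rw [show sufListD D (a :: as) = maxSufD D (a :: as) :: sufListD D as from rfl,
    PySem.List.slice_from_one, PySem.List.slice_from_one, List.tail_cons, List.tail_cons,
    PySem.List.pyGetD_zero_cons]

-- ===== VERDICT (by name: the statement is the Claim_ definition above) =====
theorem solve_spec : Claim_equal_solve := by
  unfold Claim_equal_solve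
  intro A B C D _ hpre
  unfold Spec_solve
  obtain ⟨a, as, rfl⟩ := List.exists_cons_of_ne_nil hpre
  rw [solve_foldl, solve_alt_char]
  cases as with
  | nil => simp [maxSufD]
  | cons y t =>
    have ht : (y :: t) ≠ [] := by simp
    rw [fold_eq_comb B C D (y :: t) ht, maxSufD_cons D a (y :: t) ht, ← max_add_add_left,
      add_assoc]
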